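-- pv_equiv track=rewrite | github.com/BlueSinkers/codepath-tip102 | Week 3/Pset B/problem5.py | merge_schedules
-- ===== SOURCE A (Python) =====
-- def merge_schedules(schedule1, schedule2):
--     merged = []
--     i, j = 0, 0
--     while i < len(schedule1) and j < len(schedule2):
--         merged.append(schedule1[i])
--         merged.append(schedule2[j])
--         i += 1
--         j += 1
--     merged.extend(schedule1[i:])
--     merged.extend(schedule2[j:])
--     return "".join(merged)
-- ===== SOURCE B (Python) =====
-- def merge_schedules(schedule1, schedule2):
--     # Swap-based merge: always take the head of the "current" stream, then
--     # swap the two streams; when the current stream runs dry, the other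
--     # stream's remainder is exactly the tail to append.
--     cur, other = iter(schedule1), iter(schedule2)
--     out = []
--     while True:
--         c = next(cur, None)
--         if c is None:
--             break
--         out.append(c)
--         cur, other = other, cur
--     out.extend(other)
--     return "".join(out)
-- ===== Notes on version B (the rewrite author's own statement) =====
-- stated objective: alternative
-- what changed: Replaces A's two-index pairwise while loop plus two explicit tail extends by a swap-based merge over two iterators: one character is taken from the current stream and the streams are swapped, so there are no indices, no pairing and no per-string tail slices - a single drain of the other stream handles both orientations.
import Mathlib
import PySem

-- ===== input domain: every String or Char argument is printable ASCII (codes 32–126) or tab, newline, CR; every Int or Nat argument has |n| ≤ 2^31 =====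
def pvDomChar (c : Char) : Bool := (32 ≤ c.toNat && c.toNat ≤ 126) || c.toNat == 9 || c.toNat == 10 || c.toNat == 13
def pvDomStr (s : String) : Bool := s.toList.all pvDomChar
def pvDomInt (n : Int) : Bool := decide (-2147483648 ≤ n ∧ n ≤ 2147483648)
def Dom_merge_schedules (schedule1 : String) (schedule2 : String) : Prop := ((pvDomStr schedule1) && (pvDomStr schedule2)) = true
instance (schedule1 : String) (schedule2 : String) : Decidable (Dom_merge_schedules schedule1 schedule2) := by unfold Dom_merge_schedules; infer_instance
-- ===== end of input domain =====

-- B replaces A's two-index pairwise loop with two tail extends by a swap-based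
-- merge: take the head of the current stream, swap the streams, drain the other
-- stream at the end (alternative decomposition, same cost).

-- ===== PORT A =====
-- the while loop consuming one char of each string per iteration, then the two tail extends
def pvMergeLoopA : List Char → List Char → List Char
  | a :: t1, b :: t2 => a :: b :: pvMergeLoopA t1 t2
  | l1, l2 => l1 ++ l2

def merge_schedules (schedule1 : String) (schedule2 : String) : String :=
  String.mk (pvMergeLoopA schedule1.toList schedule2.toList)

-- ===== PORT B =====
-- the swap loop: take head of cur, swap cur/other; on exhaustion append other
def pvMergeSwapB : List Char → List Char → List Char
  | [], other => other
  | c :: t, other => c :: pvMergeSwapB other t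
termination_by cur other => cur.length + other.length
decreasing_by simp; omega

def merge_schedules_alt (schedule1 : String) (schedule2 : String) : String :=
  String.mk (pvMergeSwapB schedule1.toList schedule2.toList)

-- ===== PRECONDITION & SPEC =====
def Spec_merge_schedules (schedule1 : String) (schedule2 : String) (out : String) : Prop := out = merge_schedules_alt schedule1 schedule2
instance (schedule1 : String) (schedule2 : String) (out : String) : Decidable (Spec_merge_schedules schedule1 schedule2 out) := by unfold Spec_merge_schedules; infer_instance

-- ===== CLAIM =====
def Claim_equal_merge_schedules : Prop := ∀ (schedule1 : String) (schedule2 : String), Dom_merge_schedules schedule1 schedule2 → Spec_merge_schedules schedule1 schedule2 (merge_schedules schedule1 schedule2)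

-- ===== LEMMAS AND PROOFS =====
theorem pvMergeLoopA_eq_swap (l1 l2 : List Char) :
    pvMergeLoopA l1 l2 = pvMergeSwapB l1 l2 := by
  induction l1 generalizing l2 with
  | nil => cases l2 <;> simp [pvMergeLoopA, pvMergeSwapB]
  | cons a t1 ih =>
    cases l2 with
    | nil => simp [pvMergeLoopA, pvMergeSwapB]
    | cons b t2 => simp [pvMergeLoopA, pvMergeSwapB, ih]

-- ===== VERDICT =====
theorem merge_schedules_spec : Claim_equal_merge_schedules := by
  intro s1 s2 _
  show merge_schedules s1 s2 = merge_schedules_alt s1 s2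
  simp [merge_schedules, merge_schedules_alt, pvMergeLoopA_eq_swap]
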